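-- pv_equiv track=rewrite | github.com/BeyondTheClouds/enoslib | enoslib/utils.py | generate_ssh_option_gateway
-- ===== SOURCE A (Python) =====
-- from typing import Dict, Iterable, Mapping, Optional, Tuple
--
-- def generate_ssh_option_gateway(gateways: Iterable[Tuple[str, Optional[str]]]) -> str:
--     """Generates the appropriate SSH options to connect through a list of
--     gateways (i.e. SSH jump hosts).
--
--     The first gateway in the argument should be the outermost one.  For
--     example, the connection [client] -> [gwA] -> [gwB] -> [destination]
--     can be expressed as [('gwA', None), ('gwB', None)]
--
--     Args:
--         gateways: List of (gateway, gateway_user) tuples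
--
--     Returns:
--         str: ssh option that can be fed to the "ssh" command
--     """
--     # Filter out items with a gateway set to None or to an empty string.
--     gateways = [gw for gw in gateways if gw[0] is not None and gw[0] != ""]
--     # No more than 2 hops for now (it's complex enough to handle two)
--     # To do more, we will likely need to work recursively.
--     if len(gateways) > 2:
--         raise ValueError("Only two SSH gateways are supported at the moment")
--     if len(gateways) == 0:
--         return ""
--     # Disable hostkey checking for all hops
--     common_args = [
--         "-o StrictHostKeyChecking=no",
--         "-o UserKnownHostsFile=/dev/null",
--     ]
--     inner_gateway = gateways[-1][0]
--     inner_gateway_user = gateways[-1][1]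
--     inner_proxy_cmd = ["ssh -W %h:%p"]
--     inner_proxy_cmd.extend(common_args)
--     if inner_gateway_user is not None and inner_gateway_user != "":
--         inner_proxy_cmd.append(f"-l {inner_gateway_user}")
--     if len(gateways) == 1:
--         inner_proxy_cmd.append(inner_gateway)
--         final_proxy_cmd = " ".join(inner_proxy_cmd)
--         return f'-o ProxyCommand="{final_proxy_cmd}"'
--     if len(gateways) == 2:
--         outer_gateway = gateways[0][0]
--         outer_gateway_user = gateways[0][1]
--         # Escape tokens so they are interpreted in the second SSH command
--         outer_proxy_cmd = ["ssh -W %%h:%%p"]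
--         outer_proxy_cmd.extend(common_args)
--         if outer_gateway_user is not None and outer_gateway_user != "":
--             outer_proxy_cmd.append(f"-l {outer_gateway_user}")
--         outer_proxy_cmd.append(outer_gateway)
--         final_outer_proxy_cmd = " ".join(outer_proxy_cmd)
--         # Integrate in first command
--         inner_proxy_cmd.append(f"-o ProxyCommand='{final_outer_proxy_cmd}'")
--         inner_proxy_cmd.append(inner_gateway)
--         final_proxy_cmd = " ".join(inner_proxy_cmd)
--         return f'-o ProxyCommand="{final_proxy_cmd}"'
--     msg = "generate_ssh_option_gateway only supports up to 2 gateways for now"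
--     raise ValueError(msg)
-- ===== SOURCE B (Python) =====
-- def generate_ssh_option_gateway(gateways):
--     hops = [(h, u) for h, u in gateways if h is not None and h != ""]
--     if len(hops) > 2:
--         raise ValueError("Only two SSH gateways are supported at the moment")
--     if not hops:
--         return ""
--
--     def fragment(hop, token, extra):
--         host, user = hop
--         parts = [
--             f"ssh -W {token}",
--             "-o StrictHostKeyChecking=no",
--             "-o UserKnownHostsFile=/dev/null",
--         ]
--         if user:
--             parts.append(f"-l {user}")
--         parts.extend(extra)
--         parts.append(host)
--         return " ".join(parts)
--
--     n = len(hops)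
--     cmd = ""
--     # Outermost hop first: each later hop wraps the previous command as an
--     # embedded ProxyCommand; percent tokens are escaped once per nesting level.
--     for i, hop in enumerate(hops):
--         esc = "%" * (n - i)
--         token = f"{esc}h:{esc}p"
--         extra = [] if cmd == "" else [f"-o ProxyCommand='{cmd}'"]
--         cmd = fragment(hop, token, extra)
--     return f'-o ProxyCommand="{cmd}"'
-- ===== Notes on version B (the rewrite author's own statement) =====
-- stated objective: simpler
-- what changed: Replaces A's unrolled len==1/len==2 branches (duplicated option-list building) by one fragment helper folded over the filtered gateways from outermost to innermost, wrapping each previous command as an embedded ProxyCommand with per-level percent escaping.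
import Mathlib
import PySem

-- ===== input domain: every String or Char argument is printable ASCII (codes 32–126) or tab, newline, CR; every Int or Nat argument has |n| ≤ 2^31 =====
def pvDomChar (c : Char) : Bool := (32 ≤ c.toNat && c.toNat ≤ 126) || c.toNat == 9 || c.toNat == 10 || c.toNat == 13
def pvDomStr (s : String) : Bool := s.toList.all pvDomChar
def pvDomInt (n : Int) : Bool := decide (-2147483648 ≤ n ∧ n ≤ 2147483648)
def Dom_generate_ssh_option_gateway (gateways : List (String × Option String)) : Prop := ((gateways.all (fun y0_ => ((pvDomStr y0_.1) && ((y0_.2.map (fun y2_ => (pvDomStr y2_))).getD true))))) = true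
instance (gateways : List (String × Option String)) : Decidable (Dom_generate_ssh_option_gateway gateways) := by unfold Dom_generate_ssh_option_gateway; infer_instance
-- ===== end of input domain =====

-- B replaces A's unrolled len==1 / len==2 branches by one fragment helper folded over the
-- filtered gateways (objective: simpler). Equivalence is about the return value on the
-- inputs where A returns (Pre_: at most two non-empty gateways; beyond that A raises ValueError).

-- ===== PORT A =====
-- literal transliteration of A
def generate_ssh_option_gateway (gateways : List (String × Option String)) : String :=
  let gws := gateways.filter (fun gw => gw.1 != "")
  if 2 < gws.length then ""   -- Python raises ValueError here; excluded by Pre_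
  else if gws.length == 0 then ""
  else
    let commonArgs := ["-o StrictHostKeyChecking=no", "-o UserKnownHostsFile=/dev/null"]
    let innerGw := (PySem.List.pyGetD gws (-1) ("", none)).1
    let innerUser := (PySem.List.pyGetD gws (-1) ("", none)).2
    let innerProxyCmd := ["ssh -W %h:%p"] ++ commonArgs
    let innerProxyCmd := innerProxyCmd ++
      (match innerUser with
       | some u => if u != "" then ["-l " ++ u] else []
       | none => [])
    if gws.length == 1 then
      let innerProxyCmd := innerProxyCmd ++ [innerGw]
      "-o ProxyCommand=\"" ++ PySem.Str.join " " innerProxyCmd ++ "\""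
    else
      let outerGw := (PySem.List.pyGetD gws 0 ("", none)).1
      let outerUser := (PySem.List.pyGetD gws 0 ("", none)).2
      let outerProxyCmd := ["ssh -W %%h:%%p"] ++ commonArgs
      let outerProxyCmd := outerProxyCmd ++
        (match outerUser with
         | some u => if u != "" then ["-l " ++ u] else []
         | none => [])
      let outerProxyCmd := outerProxyCmd ++ [outerGw]
      let finalOuter := PySem.Str.join " " outerProxyCmd
      let innerProxyCmd := innerProxyCmd ++ ["-o ProxyCommand='" ++ finalOuter ++ "'"] ++ [innerGw]
      "-o ProxyCommand=\"" ++ PySem.Str.join " " innerProxyCmd ++ "\""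

-- ===== PORT B =====
-- B's fragment helper
def pvFragment (hop : String × Option String) (token : String) (extra : List String) : String :=
  let parts := ["ssh -W " ++ token,
                "-o StrictHostKeyChecking=no",
                "-o UserKnownHostsFile=/dev/null"]
  let parts := parts ++
    (match hop.2 with
     | some u => if u != "" then ["-l " ++ u] else []
     | none => [])
  let parts := parts ++ extra ++ [hop.1]
  PySem.Str.join " " parts

def generate_ssh_option_gateway_alt (gateways : List (String × Option String)) : String :=
  let hops := gateways.filter (fun gw => gw.1 != "")
  if 2 < hops.length then ""   -- Python raises ValueError here; excluded by Pre_
  else if hops.isEmpty then ""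
  else
    let n := hops.length
    let cmd := (PySem.List.enumerate hops).foldl
      (fun cmd p =>
        let esc := String.ofList (List.replicate (n - p.1.toNat) '%')
        let token := esc ++ "h:" ++ esc ++ "p"
        let extra := if cmd == "" then [] else ["-o ProxyCommand='" ++ cmd ++ "'"]
        pvFragment p.2 token extra) ""
    "-o ProxyCommand=\"" ++ cmd ++ "\""

-- ===== PRECONDITION & SPEC =====
-- Pre_ excludes inputs with more than two non-empty gateways, on which A raises ValueError.
def Pre_generate_ssh_option_gateway (gateways : List (String × Option String)) : Prop :=
  (gateways.filter (fun gw => gw.1 != "")).length ≤ 2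
instance (gateways : List (String × Option String)) : Decidable (Pre_generate_ssh_option_gateway gateways) := by unfold Pre_generate_ssh_option_gateway; infer_instance
def pvWitness_generate_ssh_option_gateway : (List (String × Option String)) :=
  [("gwA", none), ("gwB", some "bob")]
def Spec_generate_ssh_option_gateway (gateways : List (String × Option String)) (out : String) : Prop := out = generate_ssh_option_gateway_alt gateways
instance (gateways : List (String × Option String)) (out : String) : Decidable (Spec_generate_ssh_option_gateway gateways out) := by unfold Spec_generate_ssh_option_gateway; infer_instance

-- ===== CLAIM (what is proved, stated in full; the proofs are below) =====
def Claim_equal_generate_ssh_option_gateway : Prop := ∀ (gateways : List (String × Option String)), Dom_generate_ssh_option_gateway gateways → Pre_generate_ssh_option_gateway gateways → Spec_generate_ssh_option_gateway gateways (generate_ssh_option_gateway gateways)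

-- ===== LEMMAS AND PROOFS =====

theorem pv_main : ∀ (gateways : List (String × Option String)),
    Pre_generate_ssh_option_gateway gateways →
    generate_ssh_option_gateway gateways = generate_ssh_option_gateway_alt gateways := by
  intro gateways hpre
  unfold Pre_generate_ssh_option_gateway at hpre
  unfold generate_ssh_option_gateway generate_ssh_option_gateway_alt
  generalize hl : gateways.filter (fun gw => gw.1 != "") = l at *
  rcases l with _ | ⟨a, _ | ⟨b, _ | ⟨c, t⟩⟩⟩
  · decide
  · rcases a with ⟨h1, u1⟩
    simp only [PySem.List.enumerate, pvFragment, List.foldl]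
    rcases u1 with _ | u1
    · simp [PySem.List.pyGetD, PySem.List.pyGet?, PySem.List.pyIdx?]
    · by_cases hu : u1 = "" <;>
        simp [PySem.List.pyGetD, PySem.List.pyGet?, PySem.List.pyIdx?, hu]
  · rcases a with ⟨h1, u1⟩; rcases b with ⟨h2, u2⟩
    simp only [PySem.List.enumerate, pvFragment, List.foldl]
    rcases u1 with _ | u1 <;> rcases u2 with _ | u2
    · simp [PySem.List.pyGetD, PySem.List.pyGet?, PySem.List.pyIdx?, PySem.Str.join,
        PySem.Chars.join, List.intercalate, List.intersperse, List.append_assoc]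
    · by_cases hu2 : u2 = "" <;>
        simp [PySem.List.pyGetD, PySem.List.pyGet?, PySem.List.pyIdx?, hu2, PySem.Str.join,
          PySem.Chars.join, List.intercalate, List.intersperse, List.append_assoc]
    · by_cases hu1 : u1 = "" <;>
        simp [PySem.List.pyGetD, PySem.List.pyGet?, PySem.List.pyIdx?, hu1, PySem.Str.join,
          PySem.Chars.join, List.intercalate, List.intersperse, List.append_assoc]
    · by_cases hu1 : u1 = "" <;> by_cases hu2 : u2 = "" <;>
        simp [PySem.List.pyGetD, PySem.List.pyGet?, PySem.List.pyIdx?, hu1, hu2, PySem.Str.join,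
          PySem.Chars.join, List.intercalate, List.intersperse, List.append_assoc]
  · simp at hpre

-- ===== VERDICT (by name: the statement is the Claim_ definition above) =====
theorem generate_ssh_option_gateway_spec : Claim_equal_generate_ssh_option_gateway := by
  intro gateways _ hpre
  exact pv_main gateways hpre
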